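-- pv_equiv track=rewrite | github.com/AlexandraPetuhova/QA326 | ДЗ 14.py | if_exist
-- ===== SOURCE A (Python) =====
-- def if_exist(figure):
--     if len(figure) < 3:
--         return False
--     for side in figure:
--         figure2 = figure.copy()
--         figure2.remove(side)
--         try:
--             if side >= sum(figure2) or side <= 0:
--                 return False
--         except TypeError:
--             return False
--     return True
-- ===== SOURCE B (Python) =====
-- def if_exist(figure):
--     if len(figure) < 3:
--         return False
--     total = sum(figure)
--     return min(figure) > 0 and 2 * max(figure) < total
-- ===== Notes on version B (the rewrite author's own statement) =====
-- stated objective: simpler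
-- what changed: Replaces A's per-side copy/remove/resum loop with one aggregate check: since removing a side leaves sum total-side, testing every side reduces to min(figure)>0 and 2*max(figure)<total.
import Mathlib
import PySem

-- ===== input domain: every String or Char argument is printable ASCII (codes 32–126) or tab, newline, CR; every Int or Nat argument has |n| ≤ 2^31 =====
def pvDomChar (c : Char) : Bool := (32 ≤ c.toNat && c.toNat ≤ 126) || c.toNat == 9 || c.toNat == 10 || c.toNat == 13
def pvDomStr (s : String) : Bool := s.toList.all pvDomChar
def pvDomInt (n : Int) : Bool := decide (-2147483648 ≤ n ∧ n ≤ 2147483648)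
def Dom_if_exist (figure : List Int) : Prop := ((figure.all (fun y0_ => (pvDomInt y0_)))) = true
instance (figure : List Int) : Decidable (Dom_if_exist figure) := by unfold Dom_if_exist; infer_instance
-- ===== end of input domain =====

-- B replaces A's per-side copy/remove/resum loop with a single aggregate check on min and max (simpler, one pass).

-- ===== PORT A =====
-- the 'for side in figure' loop: figure2 = figure.copy(); figure2.remove(side); the guard, else next side
def ifExistLoop (figure : List Int) : List Int → Bool
  | [] => true
  | side :: rest =>
    match PySem.List.remove? figure side with
    | none => false   -- unreachable (side ∈ figure): Python's remove would raise ValueError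
    | some figure2 =>
      if side ≥ figure2.sum ∨ side ≤ 0 then false
      else ifExistLoop figure rest

def if_exist (figure : List Int) : Bool :=
  if figure.length < 3 then false
  else ifExistLoop figure figure

-- ===== PORT B =====
def if_exist_alt (figure : List Int) : Bool :=
  if figure.length < 3 then false
  else
    let total := figure.sum
    match PySem.List.min? figure (fun x => x), PySem.List.max? figure (fun x => x) with
    | some mn, some mx => decide (0 < mn) && decide (2 * mx < total)
    | _, _ => false

-- ===== PRECONDITION & SPEC =====
def Spec_if_exist (figure : List Int) (out : Bool) : Prop := out = if_exist_alt figure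
instance (figure : List Int) (out : Bool) : Decidable (Spec_if_exist figure out) := by unfold Spec_if_exist; infer_instance

-- ===== CLAIM (what is proved, stated in full; the proofs are below) =====
def Claim_equal_if_exist : Prop := ∀ (figure : List Int), Dom_if_exist figure → Spec_if_exist figure (if_exist figure)

-- ===== LEMMAS AND PROOFS =====

-- A's loop over a sublist l of figure is an 'all' of the pointwise condition
theorem ifExistLoop_eq_all (figure : List Int) :
    ∀ l : List Int, (∀ s ∈ l, s ∈ figure) →
      ifExistLoop figure l = l.all (fun s => decide (0 < s) && decide (2 * s < figure.sum)) := by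
  intro l
  induction l with
  | nil => intro _; rfl
  | cons side rest ih =>
    intro h
    have hmem : side ∈ figure := h side (List.mem_cons_self)
    have hrem := PySem.List.remove?_eq_some_erase figure side hmem
    have hsum : (figure.erase side).sum = figure.sum - side := by
      have := List.sum_erase (l := figure) (a := side) hmem
      omega
    simp only [ifExistLoop, hrem, hsum]
    by_cases hc : side ≥ figure.sum - side ∨ side ≤ 0
    · simp only [if_pos hc, List.all_cons]
      rcases hc with hc | hc
      · have h2 : decide (2 * side < figure.sum) = false := by
          simp only [decide_eq_false_iff_not, not_lt]; omega
        simp [h2]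
      · have h2 : decide (0 < side) = false := by
          simp only [decide_eq_false_iff_not, not_lt]; omega
        simp [h2]
    · simp only [if_neg hc, List.all_cons]
      have h1 : 0 < side ∧ 2 * side < figure.sum := by omega
      rw [ih (fun s hs => h s (List.mem_cons_of_mem _ hs))]
      simp [h1.1, h1.2]

theorem if_exist_spec : Claim_equal_if_exist := by
  intro figure _
  unfold Spec_if_exist if_exist if_exist_alt
  by_cases hlen : figure.length < 3
  · simp [hlen]
  · simp only [if_neg hlen]
    match hfig : figure with
    | [] => simp at hlen
    | x :: t =>
      rw [ifExistLoop_eq_all (x :: t) (x :: t) (fun s hs => hs)]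
      rw [PySem.List.min?_id_cons, PySem.List.max?_id_cons]
      simp only []
      have hmnm : PySem.List.min? (x :: t) (fun y => y) = some (t.foldl min x) :=
        PySem.List.min?_id_cons x t
      have hmxm : PySem.List.max? (x :: t) (fun y => y) = some (t.foldl max x) :=
        PySem.List.max?_id_cons x t
      have hmnMem : t.foldl min x ∈ x :: t := PySem.List.min?_mem hmnm
      have hmxMem : t.foldl max x ∈ x :: t := PySem.List.max?_mem hmxm
      have hmnMin : ∀ y ∈ x :: t, t.foldl min x ≤ y := fun y hy => PySem.List.min?_isMin hmnm y hy
      have hmxMax : ∀ y ∈ x :: t, y ≤ t.foldl max x := fun y hy => PySem.List.max?_isMax hmxm y hy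
      rw [Bool.eq_iff_iff]
      simp only [List.all_eq_true, Bool.and_eq_true, decide_eq_true_eq]
      constructor
      · intro hall
        exact ⟨(hall _ hmnMem).1, (hall _ hmxMem).2⟩
      · intro ⟨h1, h2⟩ s hs
        exact ⟨lt_of_lt_of_le h1 (hmnMin s hs), by have := hmxMax s hs; omega⟩
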